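-- pv_equiv track=rewrite | github.com/catalin-h/python-ws | dynamic-programming/largest_submatrix_of_ones/submatrix.py | max_submatrix_area_wrong
-- ===== SOURCE A (Python) =====
-- def max_submatrix_area_wrong(matrix: list[list[int]]) -> int:
--     if not matrix:
--         return 0
--
--     max_area = 0
--
--     heights = [0] * len(matrix[0])
--
--     for row in matrix:
--         min_height = float('inf')
--         continous_ones_len_or_width = 0
--
--         for index, cell in enumerate(row):
--
--             # if current cell is zero then reset current min height
--             # and continuous ones length
--             if not cell:
--                 min_height = float('inf')
--                 continous_ones_len_or_width = 0
--                 heights[index] = 0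
--
--                 continue
--
--             # Used to compute the wi
--             continous_ones_len_or_width += 1
--
--             # Increase height on each row
--             heights[index] += 1
--
--             min_height = min(min_height, heights[index])
--
--             # Compute current area based on previous heights
--             area = continous_ones_len_or_width * min_height
--             max_area = max(max_area, area)
--
--     return max_area
-- ===== SOURCE B (Python) =====
-- # B: same (intentionally quirky) result as A, computed in two separate passes:
-- # first build the full table of vertical-run heights, then scan each table row,
-- # splitting it into maximal nonzero segments and taking, for each segment, the
-- # best (prefix length) * (prefix minimum) over its prefixes.
--
-- def _seg_best(seg):
--     best = 0
--     m = 0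
--     for k, x in enumerate(seg):
--         m = x if k == 0 else min(m, x)
--         best = max(best, (k + 1) * m)
--     return best
--
--
-- def _row_best(hrow):
--     best = 0
--     seg = []
--     for h in hrow:
--         if h:
--             seg.append(h)
--         else:
--             best = max(best, _seg_best(seg))
--             seg = []
--     return max(best, _seg_best(seg))
--
--
-- def max_submatrix_area_wrong(matrix: list[list[int]]) -> int:
--     if not matrix:
--         return 0
--
--     # pass 1: table of consecutive-ones heights ending at each cell
--     heights = [0] * len(matrix[0])
--     table = []
--     for row in matrix:
--         for i, cell in enumerate(row):
--             heights[i] = heights[i] + 1 if cell else 0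
--         table.append(heights[:len(row)])
--
--     # pass 2: best segment-prefix area over every table row
--     best = 0
--     for hrow in table:
--         best = max(best, _row_best(hrow))
--     return best
-- ===== Notes on version B (the rewrite author's own statement) =====
-- stated objective: alternative
-- what changed: A interleaves height updates, running min/width and area maximisation in one nested scan; B first builds the whole vertical-heights table in a separate pass, then scans each table row by splitting it into maximal nonzero segments and maximising (prefix length)*(prefix min) per segment.
import Mathlib
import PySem

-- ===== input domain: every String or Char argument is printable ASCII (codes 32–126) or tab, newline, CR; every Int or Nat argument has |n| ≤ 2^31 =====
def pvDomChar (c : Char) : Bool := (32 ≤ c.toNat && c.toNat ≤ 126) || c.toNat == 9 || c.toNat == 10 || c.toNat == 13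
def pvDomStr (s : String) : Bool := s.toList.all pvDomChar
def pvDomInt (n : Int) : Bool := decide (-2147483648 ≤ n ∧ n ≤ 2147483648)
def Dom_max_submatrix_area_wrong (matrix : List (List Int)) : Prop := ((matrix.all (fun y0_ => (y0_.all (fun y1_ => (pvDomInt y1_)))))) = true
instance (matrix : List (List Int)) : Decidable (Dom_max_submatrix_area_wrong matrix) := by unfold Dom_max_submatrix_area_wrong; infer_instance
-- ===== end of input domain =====

-- B computes A's result in two separate passes (heights table, then a per-row
-- segment/prefix scan) instead of A's single interleaved scan; same cost.


-- ===== PORT A =====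
-- inner loop body of A: state (max_area, heights, min_height (none = inf), width)
def aInnerStep (st : Int × List Int × Option Int × Int) (p : Int × Int) :
    Int × List Int × Option Int × Int :=
  match st with
  | (maxA, hs, minh, w) =>
    if p.2 = 0 then
      (maxA, PySem.List.pySetD hs p.1 0, none, 0)
    else
      let w' := w + 1
      let h := PySem.List.pyGetD hs p.1 0 + 1
      let hs' := PySem.List.pySetD hs p.1 h
      let m := match minh with | none => h | some m0 => min m0 h
      (max maxA (w' * m), hs', some m, w')

def max_submatrix_area_wrong (matrix : List (List Int)) : Int :=
  if matrix = [] then 0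
  else
    let heights := List.replicate (matrix.headD []).length (0 : Int)
    (matrix.foldl
      (fun (acc : Int × List Int) row =>
        let r := (PySem.List.enumerate row).foldl aInnerStep (acc.1, acc.2, none, 0)
        (r.1, r.2.1))
      (0, heights)).1

-- ===== PORT B =====
-- _seg_best: fold over enumerate(seg) with state (best, m)
def segBest (seg : List Int) : Int :=
  ((PySem.List.enumerate seg).foldl
    (fun (st : Int × Int) (p : Int × Int) =>
      let m := if p.1 = 0 then p.2 else min st.2 p.2
      (max st.1 ((p.1 + 1) * m), m))
    (0, 0)).1

-- _row_best: fold over the row with state (best, seg)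
def rowBest (hrow : List Int) : Int :=
  let r := hrow.foldl
    (fun (st : Int × List Int) h =>
      if h ≠ 0 then (st.1, st.2 ++ [h]) else (max st.1 (segBest st.2), ([] : List Int)))
    (0, ([] : List Int))
  max r.1 (segBest r.2)

-- pass 1: build the heights table row by row (heights[:len(row)] is the slice)
def buildTable : List Int → List (List Int) → List (List Int)
  | _, [] => []
  | hs, row :: rest =>
    let hs' := (PySem.List.enumerate row).foldl
      (fun acc (p : Int × Int) =>
        PySem.List.pySetD acc p.1 (if p.2 ≠ 0 then PySem.List.pyGetD acc p.1 0 + 1 else 0))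
      hs
    PySem.List.slice hs' none (some (row.length : Int)) :: buildTable hs' rest

def max_submatrix_area_wrong_alt (matrix : List (List Int)) : Int :=
  if matrix = [] then 0
  else
    let table := buildTable (List.replicate (matrix.headD []).length (0 : Int)) matrix
    table.foldl (fun b hrow => max b (rowBest hrow)) 0

-- ===== PRECONDITION & SPEC =====
-- A indexes heights (of length len(matrix[0])) at every position of every row, so it
-- raises IndexError exactly when some row is longer than the first row; Pre_ excludes
-- exactly those inputs (A raises there, it returns everywhere else).
def Pre_max_submatrix_area_wrong (matrix : List (List Int)) : Prop :=
  ∀ row ∈ matrix, row.length ≤ (matrix.headD []).length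

instance (matrix : List (List Int)) : Decidable (Pre_max_submatrix_area_wrong matrix) := by
  unfold Pre_max_submatrix_area_wrong; infer_instance

def pvWitness_max_submatrix_area_wrong : List (List Int) := [[1, 0], [1, 1]]

def Spec_max_submatrix_area_wrong (matrix : List (List Int)) (out : Int) : Prop :=
  out = max_submatrix_area_wrong_alt matrix
instance (matrix : List (List Int)) (out : Int) : Decidable (Spec_max_submatrix_area_wrong matrix out) := by
  unfold Spec_max_submatrix_area_wrong; infer_instance

-- ===== CLAIM (what is proved, stated in full; the proofs are below) =====
def Claim_equal_max_submatrix_area_wrong : Prop :=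
  ∀ (matrix : List (List Int)), Dom_max_submatrix_area_wrong matrix →
    Pre_max_submatrix_area_wrong matrix →
    Spec_max_submatrix_area_wrong matrix (max_submatrix_area_wrong matrix)

-- ===== LEMMAS AND PROOFS =====
theorem pvSetD_natCast {α : Type} (xs : List α) (n : Nat) (v : α) (h : n < xs.length) :
    PySem.List.pySetD xs (n : Int) v = xs.set n v := by
  simp [PySem.List.pySetD, PySem.List.pySet?_natCast xs n v h]

-- the sequential per-row recursion both ports reduce to:
-- (hrun hs k l).1 = the heights written for cells l at positions k, k+1, …
-- (hrun hs k l).2 = the final heights array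
def hrun : List Int → Nat → List Int → List Int × List Int
  | hs, _, [] => ([], hs)
  | hs, k, c :: cs =>
    let h := if c = 0 then 0 else hs.getD k 0 + 1
    let r := hrun (hs.set k h) (k + 1) cs
    (h :: r.1, r.2)

-- running min as A maintains it (none = +inf)
def minh? (seg : List Int) : Option Int :=
  seg.foldl (fun o x => some (match o with | none => x | some m => min m x)) none

def rowStep (st : Int × List Int) (h : Int) : Int × List Int :=
  if h ≠ 0 then (st.1, st.2 ++ [h]) else (max st.1 (segBest st.2), ([] : List Int))

theorem hrun_length (l : List Int) : ∀ (hs : List Int) (k : Nat),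
    (hrun hs k l).2.length = hs.length := by
  induction l with
  | nil => intro hs k; rfl
  | cons c cs ih => intro hs k; simp [hrun, ih]

theorem hrun_nonneg (l : List Int) : ∀ (hs : List Int) (k : Nat),
    (∀ x ∈ hs, 0 ≤ x) → (∀ x ∈ (hrun hs k l).2, 0 ≤ x) := by
  induction l with
  | nil => intro hs k hnn; exact hnn
  | cons c cs ih =>
    intro hs k hnn
    refine ih _ _ ?_
    intro x hx
    rcases List.mem_or_eq_of_mem_set hx with h1 | h1
    · exact hnn x h1
    · subst h1
      split
      · exact le_refl 0
      · have hg : 0 ≤ hs.getD k 0 := by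
          rcases hxk : hs[k]? with _ | v
          · simp [List.getD, hxk]
          · have := hnn v (List.mem_of_getElem? hxk)
            simpa [List.getD, hxk] using this
        omega

theorem hrun_untouched (l : List Int) : ∀ (hs : List Int) (k j : Nat), j < k →
    (hrun hs k l).2[j]? = hs[j]? := by
  induction l with
  | nil => intro hs k j hj; rfl
  | cons c cs ih =>
    intro hs k j hj
    simp only [hrun]
    rw [ih _ (k+1) j (by omega), List.getElem?_set_ne (by omega)]

theorem hrun_take (l : List Int) : ∀ (hs : List Int) (k : Nat),
    k + l.length ≤ hs.length →
    (hrun hs k l).1 = ((hrun hs k l).2.drop k).take l.length := by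
  induction l with
  | nil => intro hs k hk; simp [hrun]
  | cons c cs ih =>
    intro hs k hk
    simp only [hrun]
    have hk' : k + (cs.length + 1) ≤ hs.length := by simpa using hk
    set h := if c = 0 then 0 else hs.getD k 0 + 1 with hh
    have hlen : (hrun (hs.set k h) (k+1) cs).2.length = hs.length := by
      rw [hrun_length]; simp
    have hklen : k < (hrun (hs.set k h) (k+1) cs).2.length := by rw [hlen]; omega
    rw [List.drop_eq_getElem_cons hklen]
    have hk2 : k < (hs.set k h).length := by simp; omega
    have hgk : (hrun (hs.set k h) (k+1) cs).2[k] = h := by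
      have h1 := hrun_untouched cs (hs.set k h) (k+1) k (by omega)
      rw [List.getElem?_eq_getElem hklen, List.getElem?_eq_getElem hk2] at h1
      have h2 : (hs.set k h)[k] = h := List.getElem_set_self hk2
      rw [h2] at h1
      exact Option.some_injective _ h1
    rw [hgk]
    simp only [List.length_cons, List.take_succ_cons]
    rw [ih _ (k+1) (by simp; omega)]

theorem minh?_snoc (seg : List Int) (h : Int) :
    minh? (seg ++ [h]) = some (match minh? seg with | none => h | some m => min m h) := by
  simp [minh?, List.foldl_append]

def segStep (st : Int × Int) (p : Int × Int) : Int × Int :=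
  let m := if p.1 = 0 then p.2 else min st.2 p.2
  (max st.1 ((p.1 + 1) * m), m)

theorem segBest_eq (seg : List Int) :
    segBest seg = ((PySem.List.enumerate seg).foldl segStep (0, 0)).1 := rfl

theorem minh?_aux (xs : List Int) : ∀ (m : Int),
    xs.foldl (fun o x => some (match o with | none => x | some m => min m x)) (some m)
      = some (xs.foldl min m) := by
  induction xs with
  | nil => intro m; rfl
  | cons x xs ih => intro m; simp only [List.foldl_cons]; exact ih (min m x)

theorem minh?_cons (x : Int) (xs : List Int) : minh? (x :: xs) = some (xs.foldl min x) := by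
  simp only [minh?, List.foldl_cons]
  exact minh?_aux xs x

theorem sfold_snd (xs : List Int) : ∀ (k : Nat) (b m : Int), 0 < k →
    ((PySem.List.enumerate xs (k : Int)).foldl segStep (b, m)).2 = xs.foldl min m := by
  induction xs with
  | nil => intro k b m hk; rfl
  | cons x xs ih =>
    intro k b m hk
    rw [PySem.List.enumerate_cons]
    simp only [List.foldl_cons]
    have h1 : segStep (b, m) ((k : Int), x) = (max b (((k:Int) + 1) * min m x), min m x) := by
      simp [segStep, Int.natCast_eq_zero, Nat.pos_iff_ne_zero.mp hk]
    rw [h1]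
    have h2 : (k : Int) + 1 = ((k + 1 : Nat) : Int) := by push_cast; ring
    rw [h2, ih (k+1) _ _ (by omega)]

theorem segBest_snoc (seg : List Int) (h : Int) :
    segBest (seg ++ [h]) =
      max (segBest seg)
        (((seg.length : Int) + 1) * (match minh? seg with | none => h | some m => min m h)) := by
  cases seg with
  | nil =>
    simp [segBest, PySem.List.enumerate_cons, PySem.List.enumerate_nil, minh?]
  | cons x xs =>
    rw [segBest_eq, PySem.List.enumerate_append, List.foldl_append]
    have hone : PySem.List.enumerate [h] (0 + ((x :: xs).length : Int))
        = [(((x :: xs).length : Int), h)] := by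
      rw [PySem.List.enumerate_cons, PySem.List.enumerate_nil]
      norm_num
    rw [hone]
    simp only [List.foldl_cons, List.foldl_nil]
    have hsnd : ((PySem.List.enumerate (x :: xs) 0).foldl segStep (0, 0)).2 = xs.foldl min x := by
      rw [PySem.List.enumerate_cons]
      simp only [List.foldl_cons]
      have h1 : segStep (0, 0) ((0 : Int), x) = (max 0 ((0 + 1) * x), x) := by simp [segStep]
      rw [h1]
      have h2 : (0 : Int) + 1 = ((1 : Nat) : Int) := by norm_num
      rw [h2, sfold_snd xs 1 _ x (by omega)]
    have hlen : ((x :: xs).length : Int) ≠ 0 := by simp; omega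
    rw [minh?_cons]
    simp only [segStep, segBest_eq, hsnd]
    have hlen2 : ¬ ((xs.length : Int) + 1 = 0) := by omega
    simp [hlen2]

theorem rowStep_mono (rest : List Int) : ∀ (b : Int) (s : List Int),
    max b (segBest s) ≤
      max ((rest.foldl rowStep (b, s)).1) (segBest ((rest.foldl rowStep (b, s)).2)) := by
  induction rest with
  | nil => intro b s; exact le_refl _
  | cons h t ih =>
    intro b s
    simp only [List.foldl_cons]
    by_cases hz : h ≠ 0
    · rw [show rowStep (b, s) h = (b, s ++ [h]) from by simp [rowStep, hz]]
      refine le_trans ?_ (ih b (s ++ [h]))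
      have := segBest_snoc s h
      have h2 : segBest s ≤ segBest (s ++ [h]) := by rw [this]; exact le_max_left _ _
      exact max_le (le_max_left _ _) (le_trans h2 (le_max_right _ _))
    · rw [show rowStep (b, s) h = (max b (segBest s), ([] : List Int)) from by simp [rowStep, hz]]
      refine le_trans ?_ (ih _ [])
      exact le_max_left _ _

-- B's pass-1 fold equals hrun's final heights
theorem bfold_eq_hrun (l : List Int) : ∀ (hs : List Int) (k : Nat), k + l.length ≤ hs.length →
    (PySem.List.enumerate l (k : Int)).foldl
      (fun acc (p : Int × Int) =>
        PySem.List.pySetD acc p.1 (if p.2 ≠ 0 then PySem.List.pyGetD acc p.1 0 + 1 else 0)) hs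
    = (hrun hs k l).2 := by
  induction l with
  | nil => intro hs k hlen; simp [PySem.List.enumerate_nil, hrun]
  | cons c cs ih =>
    intro hs k hlen
    rw [PySem.List.enumerate_cons]
    simp only [List.foldl_cons, List.length_cons] at *
    have hklt : k < hs.length := by omega
    have hstep : PySem.List.pySetD hs (k : Int) (if c ≠ 0 then PySem.List.pyGetD hs (k : Int) 0 + 1 else 0)
        = hs.set k (if c = 0 then 0 else hs.getD k 0 + 1) := by
      rw [PySem.List.pyGetD_natCast, pvSetD_natCast _ _ _ hklt]
      by_cases hc : c = 0 <;> simp [hc]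
    rw [hstep]
    have h2 : (k : Int) + 1 = ((k + 1 : Nat) : Int) := by push_cast; ring
    rw [h2, ih _ (k+1) (by simp; omega)]
    simp [hrun]

-- the key row lemma: A's inner fold vs B's segment scan of the heights row
theorem inner_eq (l : List Int) : ∀ (k : Nat) (hs : List Int) (maxA b : Int) (seg : List Int),
    k + l.length ≤ hs.length → (∀ x ∈ hs, 0 ≤ x) → 0 ≤ maxA → b ≤ maxA → segBest seg ≤ maxA →
    (PySem.List.enumerate l (k : Int)).foldl aInnerStep (maxA, hs, minh? seg, (seg.length : Int))
    = (let F := ((hrun hs k l).1).foldl rowStep (b, seg)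
       (max maxA (max F.1 (segBest F.2)), (hrun hs k l).2, minh? F.2, (F.2.length : Int))) := by
  induction l with
  | nil =>
    intro k hs maxA b seg hlen hnn hA hb hseg
    simp only [PySem.List.enumerate_nil, List.foldl_nil, hrun]
    have hm : max maxA (max b (segBest seg)) = maxA := by
      rw [max_eq_left (max_le hb hseg)]
    rw [hm]
  | cons c cs ih =>
    intro k hs maxA b seg hlen hnn hA hb hseg
    rw [PySem.List.enumerate_cons]
    simp only [List.foldl_cons, List.length_cons] at *
    have hklt : k < hs.length := by omega
    have hcast : (k : Int) + 1 = ((k + 1 : Nat) : Int) := by push_cast; ring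
    have hg : 0 ≤ hs.getD k 0 := by
      rcases hxk : hs[k]? with _ | v
      · simp [List.getD, hxk]
      · have := hnn v (List.mem_of_getElem? hxk)
        simpa [List.getD, hxk] using this
    by_cases hc : c = 0
    · -- zero cell: reset
      have hstep : aInnerStep (maxA, hs, minh? seg, (seg.length : Int)) ((k : Int), c)
          = (maxA, hs.set k 0, none, 0) := by
        simp [aInnerStep, hc, pvSetD_natCast _ _ _ hklt]
      rw [hstep, hcast]
      have hnn' : ∀ x ∈ hs.set k 0, 0 ≤ x := by
        intro x hx
        rcases List.mem_or_eq_of_mem_set hx with h1 | h1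
        · exact hnn x h1
        · omega
      have hih := ih (k+1) (hs.set k 0) maxA (max b (segBest seg)) []
        (by simp; omega) hnn' hA (max_le hb hseg) (by simpa [segBest] using hA)
      have hm0 : minh? ([] : List Int) = none := rfl
      have hl0 : ((([] : List Int)).length : Int) = 0 := rfl
      rw [hm0, hl0] at hih
      rw [hih]
      -- align with the goal's hrun unfolding
      simp only [hrun, hc, if_pos]
      have hF : rowStep (b, seg) 0 = (max b (segBest seg), ([] : List Int)) := by
        simp [rowStep]
      simp only [List.foldl_cons, hF]
    · -- nonzero cell
      set h := hs.getD k 0 + 1 with hh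
      have hhz : ¬ (h = 0) := by omega
      set m := (match minh? seg with | none => h | some m0 => min m0 h) with hm
      have hstep : aInnerStep (maxA, hs, minh? seg, (seg.length : Int)) ((k : Int), c)
          = (max maxA (((seg.length : Int) + 1) * m), hs.set k h, some m, (seg.length : Int) + 1) := by
        simp only [aInnerStep, if_neg hc]
        rw [PySem.List.pyGetD_natCast, pvSetD_natCast _ _ _ hklt]
      rw [hstep, hcast]
      set maxA' := max maxA (((seg.length : Int) + 1) * m) with hA'
      have hsm : some m = minh? (seg ++ [h]) := (minh?_snoc seg h).symm
      have hsl : (seg.length : Int) + 1 = (((seg ++ [h]).length : Nat) : Int) := by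
        simp
      have hnn' : ∀ x ∈ hs.set k h, 0 ≤ x := by
        intro x hx
        rcases List.mem_or_eq_of_mem_set hx with h1 | h1
        · exact hnn x h1
        · omega
      have hsegsnoc : segBest (seg ++ [h]) = max (segBest seg) (((seg.length : Int) + 1) * m) := by
        rw [segBest_snoc]
      have hih := ih (k+1) (hs.set k h) maxA' b (seg ++ [h])
        (by simp; omega) hnn' (le_trans hA (le_max_left _ _)) (le_trans hb (le_max_left _ _))
        (by rw [hsegsnoc]; exact max_le (le_trans hseg (le_max_left _ _)) (le_max_right _ _))
      rw [hsm, hsl, hih]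
      -- align the RHS
      simp only [hrun, if_neg hc]
      simp only [List.foldl_cons]
      have hF : rowStep (b, seg) h = (b, seg ++ [h]) := by simp [rowStep, hhz]
      rw [← hh, hF]
      set r1 := (hrun (hs.set k h) (k+1) cs).1 with hr1
      set F := r1.foldl rowStep (b, seg ++ [h]) with hFdef
      -- absorb the intermediate max: (len+1)*m ≤ max F.1 (segBest F.2)
      have hmono := rowStep_mono r1 b (seg ++ [h])
      have hle : ((seg.length : Int) + 1) * m ≤ max F.1 (segBest F.2) := by
        refine le_trans ?_ (le_trans hmono (le_refl _))
        rw [hsegsnoc]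
        exact le_trans (le_max_right (segBest seg) _) (le_max_right b _)
      have habs : max maxA' (max F.1 (segBest F.2)) = max maxA (max F.1 (segBest F.2)) := by
        rw [hA', max_assoc, max_eq_right hle]
      rw [habs]

theorem outer_eq (rows : List (List Int)) : ∀ (hs : List Int) (maxA : Int),
    0 ≤ maxA → (∀ x ∈ hs, 0 ≤ x) → (∀ row ∈ rows, row.length ≤ hs.length) →
    (rows.foldl
      (fun (acc : Int × List Int) row =>
        let r := (PySem.List.enumerate row).foldl aInnerStep (acc.1, acc.2, none, 0)
        (r.1, r.2.1)) (maxA, hs)).1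
    = (buildTable hs rows).foldl (fun b hrow => max b (rowBest hrow)) maxA := by
  induction rows with
  | nil => intro hs maxA hA hnn hrows; simp [buildTable]
  | cons row rest ih =>
    intro hs maxA hA hnn hrows
    have hrl : row.length ≤ hs.length := hrows row (by simp)
    have hinner := inner_eq row 0 hs maxA 0 []
      (by simpa using hrl) hnn hA hA (by simpa [segBest] using hA)
    have hm0 : minh? ([] : List Int) = none := rfl
    have hl0 : ((([] : List Int)).length : Int) = 0 := rfl
    rw [hm0, hl0] at hinner
    have hz : ((0 : Nat) : Int) = 0 := rfl
    rw [hz] at hinner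
    simp only [List.foldl_cons]
    rw [show (PySem.List.enumerate row : List (Int × Int)) = PySem.List.enumerate row 0 from rfl]
    rw [hinner]
    simp only [buildTable, List.foldl_cons]
    have hbf : (PySem.List.enumerate row).foldl
        (fun acc (p : Int × Int) =>
          PySem.List.pySetD acc p.1 (if p.2 ≠ 0 then PySem.List.pyGetD acc p.1 0 + 1 else 0)) hs
        = (hrun hs 0 row).2 := by
      rw [show (PySem.List.enumerate row : List (Int × Int)) = PySem.List.enumerate row 0 from rfl]
      rw [show (0 : Int) = ((0 : Nat) : Int) from rfl]
      exact bfold_eq_hrun row hs 0 (by simpa using hrl)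
    rw [hbf]
    have hslice : PySem.List.slice (hrun hs 0 row).2 none (some (row.length : Int))
        = (hrun hs 0 row).1 := by
      rw [PySem.List.slice_to_natCast]
      rw [hrun_take row hs 0 (by simpa using hrl)]
      simp
    rw [hslice]
    have hrb : rowBest (hrun hs 0 row).1
        = max (((hrun hs 0 row).1.foldl rowStep (0, ([] : List Int))).1)
            (segBest (((hrun hs 0 row).1.foldl rowStep (0, ([] : List Int))).2)) := rfl
    have hih := ih (hrun hs 0 row).2 (max maxA (rowBest (hrun hs 0 row).1))
      (le_trans hA (le_max_left _ _))
      (hrun_nonneg row hs 0 hnn)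
      (by intro r hr; rw [hrun_length]; exact hrows r (by simp [hr]))
    rw [← hih, hrb]

-- ===== VERDICT (by name: the statement is the Claim_ definition above) =====
theorem max_submatrix_area_wrong_spec : Claim_equal_max_submatrix_area_wrong := by
  intro matrix _ hpre
  unfold Spec_max_submatrix_area_wrong max_submatrix_area_wrong max_submatrix_area_wrong_alt
  by_cases hm : matrix = []
  · simp [hm]
  · simp only [if_neg hm]
    have hrows : ∀ row ∈ matrix, row.length ≤ (List.replicate (matrix.headD []).length (0 : Int)).length := by
      intro r hr; rw [List.length_replicate]; exact hpre r hr
    have hnn : ∀ x ∈ List.replicate (matrix.headD []).length (0 : Int), 0 ≤ x := by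
      intro x hx; rw [List.eq_of_mem_replicate hx]
    exact outer_eq matrix _ 0 (le_refl 0) hnn hrows
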